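-- pv_equiv track=rewrite | github.com/russellmiller49/Procedure_suite | ml/scripts/prodigy_prepare_registry.py | build_cats
-- ===== SOURCE A (Python) =====
-- from typing import Any, Iterable, Mapping
--
-- def build_cats(
--     labels: list[str],
--     positives: Iterable[str] = (),
-- ) -> dict[str, int]:
--     cats = {label: 0 for label in labels}
--     for label in positives:
--         if label in cats:
--             cats[label] = 1
--     return cats
-- ===== SOURCE B (Python) =====
-- def build_cats(labels, positives=()):
--     pos = set(positives)
--     return {label: int(label in pos) for label in labels}
-- ===== Notes on version B (the rewrite author's own statement) =====
-- stated objective: simpler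
-- what changed: Replaces the two-phase init-zeros-then-flip-positives scheme (a pass over labels then a pass over positives with a dict membership test) by a single dict comprehension over labels that assigns each label 1 or 0 by membership in a precomputed set of positives.
import Mathlib
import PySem

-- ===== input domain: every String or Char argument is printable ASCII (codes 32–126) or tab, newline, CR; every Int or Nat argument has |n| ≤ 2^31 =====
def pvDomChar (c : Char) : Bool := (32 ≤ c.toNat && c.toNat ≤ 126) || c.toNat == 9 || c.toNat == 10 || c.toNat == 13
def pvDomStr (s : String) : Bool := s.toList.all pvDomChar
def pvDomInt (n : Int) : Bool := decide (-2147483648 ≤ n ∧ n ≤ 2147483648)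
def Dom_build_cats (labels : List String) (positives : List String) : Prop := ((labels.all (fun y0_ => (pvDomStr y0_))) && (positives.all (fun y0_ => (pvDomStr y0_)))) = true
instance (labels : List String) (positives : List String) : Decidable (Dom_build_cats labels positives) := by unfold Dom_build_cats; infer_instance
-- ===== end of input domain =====

-- B replaces A's two-phase init-zeros-then-flip-positives dict build by one membership-keyed
-- comprehension over labels (simpler decomposition, same cost).


-- ===== PORT A =====
-- cats = {label: 0 for label in labels}; for label in positives: if label in cats: cats[label] = 1
def build_cats (labels : List String) (positives : List String) : List (String × Int) :=
  let cats : PySem.Dict String Int :=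
    labels.foldl (fun d label => d.insert label 0) PySem.Dict.empty
  let cats :=
    positives.foldl (fun d label => if d.contains label then d.insert label 1 else d) cats
  cats.items

-- ===== PORT B =====
-- pos = set(positives); {label: int(label in pos) for label in labels}
def build_cats_alt (labels : List String) (positives : List String) : List (String × Int) :=
  let pos : PySem.Set String := PySem.Set.ofList positives
  (labels.foldl
    (fun d label => d.insert label (if pos.contains label then (1 : Int) else 0))
    PySem.Dict.empty).items

-- ===== PRECONDITION & SPEC =====
def Spec_build_cats (labels : List String) (positives : List String) (out : List (String × Int)) : Prop := out = build_cats_alt labels positives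
instance (labels : List String) (positives : List String) (out : List (String × Int)) : Decidable (Spec_build_cats labels positives out) := by unfold Spec_build_cats; infer_instance

-- ===== CLAIM (what is proved, stated in full; the proofs are below) =====
def Claim_equal_build_cats : Prop := ∀ (labels : List String) (positives : List String), Dom_build_cats labels positives → Spec_build_cats labels positives (build_cats labels positives)

-- ===== LEMMAS AND PROOFS =====

-- A fold inserting (l, f l) for each label: items become the deduped labels paired through f.
theorem items_foldl_insert_fn (f : String → Int) :
    ∀ (labels s : List String), s.Nodup →
      ∀ d : PySem.Dict String Int, d.items = s.map (fun k => (k, f k)) →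
        (labels.foldl (fun d l => d.insert l (f l)) d).items
          = (PySem.Set.update s labels).map (fun k => (k, f k)) := by
  intro labels
  induction labels with
  | nil => intro s _ d hd; simpa [PySem.Set.update] using hd
  | cons l ls ih =>
    intro s hs d hd
    have hkeys : d.keys = s := by
      simp [PySem.Dict.keys, hd, Function.comp_def]
    by_cases hm : l ∈ s
    · have hc : d.contains l = true := by
        rw [PySem.Dict.contains_eq_decide_mem_keys, hkeys]; simpa using hm
      have hins : (d.insert l (f l)).items = s.map (fun k => (k, f k)) := by
        rw [PySem.Dict.items_insert_of_contains _ _ hc, hd, List.map_map]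
        refine List.map_congr_left ?_
        intro k _
        by_cases hk : k = l
        · subst hk; simp
        · simp [Function.comp, hk]
      have := ih s hs (d.insert l (f l)) hins
      simpa [PySem.Set.update, PySem.Set.add_of_mem hm] using this
    · have hc : d.contains l = false := by
        rw [PySem.Dict.contains_eq_decide_mem_keys, hkeys]; simpa using hm
      have hins : (d.insert l (f l)).items = (s ++ [l]).map (fun k => (k, f k)) := by
        rw [PySem.Dict.items_insert_of_not_contains _ _ hc, hd]; simp
      have hnd : (s ++ [l]).Nodup := by
        rw [List.nodup_append]
        refine ⟨hs, List.nodup_singleton l, ?_⟩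
        intro a ha b hb hab
        have hb' : b = l := by simpa using hb
        exact hm ((hab.trans hb') ▸ ha)
      have := ih (s ++ [l]) hnd (d.insert l (f l)) hins
      simpa [PySem.Set.update, PySem.Set.add_of_not_mem hm] using this

-- A's second phase: flipping present positives to 1 rewrites each value by membership in positives.
theorem items_foldl_flip :
    ∀ (ps : List String) (g : String → Int) (s : List String), s.Nodup →
      ∀ d : PySem.Dict String Int, d.items = s.map (fun k => (k, g k)) →
        (ps.foldl (fun d l => if d.contains l then d.insert l 1 else d) d).items
          = s.map (fun k => (k, if k ∈ ps then (1 : Int) else g k)) := by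
  intro ps
  induction ps with
  | nil => intro g s _ d hd; simpa using hd
  | cons p ps ih =>
    intro g s hs d hd
    have hkeys : d.keys = s := by simp [PySem.Dict.keys, hd, Function.comp_def]
    by_cases hm : p ∈ s
    · have hc : d.contains p = true := by
        rw [PySem.Dict.contains_eq_decide_mem_keys, hkeys]; simpa using hm
      have hins : (d.insert p 1).items
          = s.map (fun k => (k, if k = p then (1 : Int) else g k)) := by
        rw [PySem.Dict.items_insert_of_contains _ _ hc, hd, List.map_map]
        refine List.map_congr_left ?_
        intro k _
        by_cases hk : k = p
        · subst hk; simp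
        · simp [Function.comp, hk]
      have := ih (fun k => if k = p then (1 : Int) else g k) s hs (d.insert p 1) hins
      rw [List.foldl_cons, if_pos hc, this]
      refine List.map_congr_left ?_
      intro k _
      by_cases hk : k ∈ ps
      · simp [hk]
      · by_cases hkp : k = p <;> simp [hk, hkp]
    · have hc : d.contains p = false := by
        rw [PySem.Dict.contains_eq_decide_mem_keys, hkeys]; simpa using hm
      have := ih g s hs d hd
      rw [List.foldl_cons, if_neg (by simp [hc]), this]
      refine List.map_congr_left ?_
      intro k hk
      have hkp : k ≠ p := fun h => hm (h ▸ hk)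
      simp [hkp]

-- ===== VERDICT (by name: the statement is the Claim_ definition above) =====
theorem build_cats_spec : Claim_equal_build_cats := by
  unfold Claim_equal_build_cats
  intro labels positives _
  unfold Spec_build_cats build_cats build_cats_alt
  have hA1 := items_foldl_insert_fn (fun _ => (0 : Int)) labels []
    (by simp) PySem.Dict.empty rfl
  have hA := items_foldl_flip positives (fun _ => (0 : Int))
    (PySem.Set.update [] labels) (by simp [PySem.Set.update_nil_left, PySem.Set.nodup_ofList labels])
    _ hA1
  have hB := items_foldl_insert_fn
    (fun l => if (PySem.Set.ofList positives).contains l then (1 : Int) else 0)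
    labels [] (by simp) PySem.Dict.empty rfl
  rw [hA, hB]
  refine List.map_congr_left ?_
  intro k _
  by_cases hk : k ∈ positives <;> simp [hk]
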